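-- pv_equiv track=rewrite | github.com/lookinmin/CodingTest | Programmers/Lv2/오픈채팅방.py | solution
-- ===== SOURCE A (Python) =====
-- def solution(records):
--     answer = []
--     tmp = []
--     dict = {}
--
--     for record in records:
--         arr = record.split(' ')
--         if arr[0] == 'Enter':
--             dict[arr[1]] = arr[2]
--             tmp.append("{}님이 들어왔습니다.".format(arr[1]))
--         elif arr[0] == 'Change':
--             dict[arr[1]] = arr[2]
--         elif arr[0] == 'Leave':
--             tmp.append('{}님이 나갔습니다.'.format(arr[1]))
--
--     for sen in tmp:
--         k = sen.find('님')
--         answer.append(dict[sen[:k]] + sen[k:])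
--
--     return answer
-- ===== SOURCE B (Python) =====
-- def solution(records):
--     # Pass 1: collect each uid's final nickname.
--     nick = {}
--     for record in records:
--         arr = record.split(' ')
--         if arr[0] == 'Enter' or arr[0] == 'Change':
--             nick[arr[1]] = arr[2]
--
--     # Pass 2: emit messages directly from the records; no intermediate
--     # sentence list and no string search / re-parse.
--     answer = []
--     for record in records:
--         arr = record.split(' ')
--         if arr[0] == 'Enter':
--             answer.append(nick[arr[1]] + '님이 들어왔습니다.')
--         elif arr[0] == 'Leave':
--             answer.append(nick[arr[1]] + '님이 나갔습니다.')
--     return answer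
-- ===== Notes on version B (the rewrite author's own statement) =====
-- stated objective: idiomatic
-- what changed: B never builds the intermediate pre-formatted sentence list: pass 1 only records final nicknames, pass 2 iterates the original records and emits each message directly, so A's '.find("님")' search and slice-reparse of its own output disappear.
import Mathlib
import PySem

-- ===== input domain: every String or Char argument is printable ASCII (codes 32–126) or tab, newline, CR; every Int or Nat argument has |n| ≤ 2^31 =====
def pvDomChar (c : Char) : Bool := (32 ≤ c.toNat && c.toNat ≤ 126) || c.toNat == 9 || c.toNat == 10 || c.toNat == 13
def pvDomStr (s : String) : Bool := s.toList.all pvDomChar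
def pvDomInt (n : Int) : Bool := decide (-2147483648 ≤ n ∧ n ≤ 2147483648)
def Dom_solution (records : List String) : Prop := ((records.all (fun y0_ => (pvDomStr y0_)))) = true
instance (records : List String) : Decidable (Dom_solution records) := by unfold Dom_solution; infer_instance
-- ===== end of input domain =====

-- B removes A's intermediate pre-formatted sentence list and its '.find("님")' re-parse:
-- pass 1 only records final nicknames, pass 2 emits each message directly from the records.

-- record.split(' ') (sep nonempty, so split? is always `some`)
def pySplitSp (record : String) : List String := (PySem.Str.split? record " ").getD []

-- ===== PORT A =====
-- first loop body: state is (tmp, dict)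
def stepA (st : List String × PySem.Dict String String) (record : String) :
    List String × PySem.Dict String String :=
  let arr := pySplitSp record
  if arr.getD 0 "" = "Enter" then
    (st.1 ++ [arr.getD 1 "" ++ "님이 들어왔습니다."], st.2.insert (arr.getD 1 "") (arr.getD 2 ""))
  else if arr.getD 0 "" = "Change" then
    (st.1, st.2.insert (arr.getD 1 "") (arr.getD 2 ""))
  else if arr.getD 0 "" = "Leave" then
    (st.1 ++ [arr.getD 1 "" ++ "님이 나갔습니다."], st.2)
  else st

-- second loop body: dict[sen[:k]] + sen[k:] (KeyError totalized by getD ""; Pre_ excludes it)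
def decodeA (d : PySem.Dict String String) (answer : List String) (sen : String) : List String :=
  let k := PySem.Str.find sen "님"
  answer ++ [((d.get? (PySem.Str.slice sen none (some k))).getD "") ++ PySem.Str.slice sen (some k) none]

def solution (records : List String) : List String :=
  let fin := records.foldl stepA ([], PySem.Dict.empty)
  fin.1.foldl (decodeA fin.2) []

-- ===== PORT B =====
-- pass 1 body: nicknames only
def stepB (d : PySem.Dict String String) (record : String) : PySem.Dict String String :=
  let arr := pySplitSp record
  if arr.getD 0 "" = "Enter" ∨ arr.getD 0 "" = "Change" then
    d.insert (arr.getD 1 "") (arr.getD 2 "")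
  else d

-- pass 2 body: emit directly (KeyError totalized by getD ""; Pre_ excludes it)
def emitB (nick : PySem.Dict String String) (answer : List String) (record : String) : List String :=
  let arr := pySplitSp record
  if arr.getD 0 "" = "Enter" then
    answer ++ [((nick.get? (arr.getD 1 "")).getD "") ++ "님이 들어왔습니다."]
  else if arr.getD 0 "" = "Leave" then
    answer ++ [((nick.get? (arr.getD 1 "")).getD "") ++ "님이 나갔습니다."]
  else answer

def solution_alt (records : List String) : List String :=
  let nick := records.foldl stepB PySem.Dict.empty
  records.foldl (emitB nick) []

-- ===== PRECONDITION & SPEC =====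
-- Pre_ excludes exactly the inputs on which the Python A raises: an 'Enter'/'Change' record with
-- fewer than 3 space-separated fields (IndexError), a 'Leave' record with fewer than 2 fields
-- (IndexError), or a 'Leave' whose uid was never assigned a nickname (KeyError in the second loop).
def Pre_solution (records : List String) : Prop :=
  ∀ r ∈ records,
    (((pySplitSp r).getD 0 "" = "Enter" ∨ (pySplitSp r).getD 0 "" = "Change") →
        3 ≤ (pySplitSp r).length) ∧
    ((pySplitSp r).getD 0 "" = "Leave" →
        2 ≤ (pySplitSp r).length ∧
        (pySplitSp r).getD 1 "" ∈ records.filterMap (fun r' =>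
          if (pySplitSp r').getD 0 "" = "Enter" ∨ (pySplitSp r').getD 0 "" = "Change"
          then some ((pySplitSp r').getD 1 "") else none))
instance (records : List String) : Decidable (Pre_solution records) := by
  unfold Pre_solution; infer_instance

def pvWitness_solution : List String := ["Enter u1 nick", "Leave u1"]

def Spec_solution (records : List String) (out : List String) : Prop := out = solution_alt records
instance (records : List String) (out : List String) : Decidable (Spec_solution records out) := by
  unfold Spec_solution; infer_instance

-- ===== CLAIM (what is proved, stated in full; the proofs are below) =====
def Claim_equal_solution : Prop :=
  ∀ (records : List String), Dom_solution records → Pre_solution records →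
    Spec_solution records (solution records)

-- ===== LEMMAS AND PROOFS =====

-- the sentences A's first loop collects, per record
def emitRawL (record : String) : List String :=
  let arr := pySplitSp record
  if arr.getD 0 "" = "Enter" then [arr.getD 1 "" ++ "님이 들어왔습니다."]
  else if arr.getD 0 "" = "Change" then []
  else if arr.getD 0 "" = "Leave" then [arr.getD 1 "" ++ "님이 나갔습니다."]
  else []

-- A's second-loop decoding of one sentence
def dec1 (d : PySem.Dict String String) (sen : String) : String :=
  ((d.get? (PySem.Str.slice sen none (some (PySem.Str.find sen "님")))).getD "") ++
    PySem.Str.slice sen (some (PySem.Str.find sen "님")) none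

-- B's pass-2 emission, per record
def emitBL (nick : PySem.Dict String String) (record : String) : List String :=
  let arr := pySplitSp record
  if arr.getD 0 "" = "Enter" then [((nick.get? (arr.getD 1 "")).getD "") ++ "님이 들어왔습니다."]
  else if arr.getD 0 "" = "Leave" then [((nick.get? (arr.getD 1 "")).getD "") ++ "님이 나갔습니다."]
  else []

theorem pass1_eq (records : List String) (tmp0 : List String) (d0 : PySem.Dict String String) :
    records.foldl stepA (tmp0, d0) =
      (tmp0 ++ records.flatMap emitRawL, records.foldl stepB d0) := by
  induction records generalizing tmp0 d0 with
  | nil => simp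
  | cons r rs ih =>
    simp only [List.foldl_cons, List.flatMap_cons, stepA, stepB, emitRawL]
    split_ifs with h1 h2 h3 <;> simp_all

theorem decodeA_fold (d : PySem.Dict String String) (tmp acc : List String) :
    tmp.foldl (decodeA d) acc = acc ++ tmp.map (dec1 d) := by
  have : decodeA d = fun acc sen => acc ++ [dec1 d sen] := by
    funext acc sen; rfl
  rw [this]
  exact PySem.List.foldl_append_singleton_eq_map _ _ _

theorem emitB_fold (nick : PySem.Dict String String) (records acc : List String) :
    records.foldl (emitB nick) acc = acc ++ records.flatMap (emitBL nick) := by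
  have : emitB nick = fun acc r => acc ++ emitBL nick r := by
    funext acc r
    simp only [emitB, emitBL]
    split_ifs <;> simp
  rw [this]
  exact PySem.List.foldl_append_eq_flatMap _ _ _

-- every character of every piece of splitOn came from the input
theorem splitOn_go_chars (sep : List Char) (fuel : Nat) :
    ∀ (l cur : List Char) (acc : List (List Char)) (t : List Char),
      t ∈ PySem.Chars.splitOn.go sep fuel l cur acc →
      ∀ c ∈ t, c ∈ l ∨ c ∈ cur ∨ ∃ u ∈ acc, c ∈ u := by
  induction fuel with
  | zero =>
    intro l cur acc t ht c hc
    rw [show PySem.Chars.splitOn.go sep 0 l cur acc = ((cur.reverse ++ l) :: acc).reverse from rfl]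
      at ht
    simp only [List.mem_reverse, List.mem_cons] at ht
    rcases ht with h | h
    · subst h; simp only [List.mem_append, List.mem_reverse] at hc; tauto
    · exact Or.inr (Or.inr ⟨t, h, hc⟩)
  | succ f ih =>
    intro l cur acc t ht c hc
    cases l with
    | nil =>
      rw [show PySem.Chars.splitOn.go sep (f+1) [] cur acc = (cur.reverse :: acc).reverse from rfl]
        at ht
      simp only [List.mem_reverse, List.mem_cons] at ht
      rcases ht with h | h
      · subst h; simp only [List.mem_reverse] at hc; tauto
      · exact Or.inr (Or.inr ⟨t, h, hc⟩)
    | cons a rest =>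
      rw [show PySem.Chars.splitOn.go sep (f+1) (a::rest) cur acc =
          (if sep.isPrefixOf (a::rest) then
            PySem.Chars.splitOn.go sep f (List.drop sep.length (a::rest)) [] (cur.reverse::acc)
          else PySem.Chars.splitOn.go sep f rest (a::cur) acc) from rfl] at ht
      split_ifs at ht with hp
      · rcases ih _ _ _ _ ht c hc with h | h | ⟨u, hu, hcu⟩
        · exact Or.inl (List.mem_of_mem_drop h)
        · simp at h
        · rcases List.mem_cons.mp hu with h | h
          · subst h; simp only [List.mem_reverse] at hcu; tauto
          · exact Or.inr (Or.inr ⟨u, h, hcu⟩)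
      · rcases ih _ _ _ _ ht c hc with h | h | ⟨u, hu, hcu⟩
        · exact Or.inl (List.mem_cons_of_mem _ h)
        · rcases List.mem_cons.mp h with h | h
          · subst h; exact Or.inl List.mem_cons_self
          · tauto
        · exact Or.inr (Or.inr ⟨u, hu, hcu⟩)

theorem splitOn_chars (s sep t : List Char) (ht : t ∈ PySem.Chars.splitOn s sep) :
    ∀ c ∈ t, c ∈ s := by
  intro c hc
  rcases splitOn_go_chars sep (s.length + 1) s [] [] t ht c hc with h | h | ⟨u, hu, _⟩
  · exact h
  · simp at h
  · simp at hu

-- the uid field of a Dom record contains no '님'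
theorem uid_no_marker (record : String) (hdom : pvDomStr record = true) (i : Nat) :
    '님' ∉ ((pySplitSp record).getD i "").toList := by
  intro hmem
  have hsplit : pySplitSp record =
      (PySem.Chars.splitOn record.toList " ".toList).map String.ofList := by
    simp [pySplitSp, PySem.Str.split?, PySem.Chars.split?]
  set l := PySem.Chars.splitOn record.toList " ".toList with hl
  by_cases hi : i < l.length
  · have : (pySplitSp record).getD i "" = String.ofList l[i] := by
      rw [hsplit]
      rw [List.getD_eq_getElem _ _ (by simpa using hi)]
      simp
    rw [this] at hmem
    simp only [String.toList_ofList] at hmem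
    have hin : '님' ∈ record.toList := splitOn_chars _ _ _ (l.getElem_mem hi) _ hmem
    simp only [pvDomStr, List.all_eq_true] at hdom
    have := hdom _ hin
    simp [pvDomChar] at this
  · have : (pySplitSp record).getD i "" = "" := by
      rw [hsplit]
      exact List.getD_eq_default _ _ (by simpa using Nat.le_of_not_lt hi)
    rw [this] at hmem
    simp at hmem

-- find of the marker in uid ++ '님'·t
theorem find_marker (u t : List Char) (hu : '님' ∉ u) :
    PySem.Chars.find (u ++ '님' :: t) ['님'] = (u.length : Int) := by
  have hinf : ['님'] <:+: u ++ '님' :: t := ⟨u, t, by simp⟩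
  have h0 : 0 ≤ PySem.Chars.find (u ++ '님' :: t) ['님'] :=
    (PySem.Chars.find_nonneg_iff _ _).mpr hinf
  obtain ⟨hpre, hmin⟩ := PySem.Chars.find_spec h0
  have hk : (PySem.Chars.find (u ++ '님' :: t) ['님']).toNat = u.length := by
    rcases lt_trichotomy (PySem.Chars.find (u ++ '님' :: t) ['님']).toNat u.length with h | h | h
    · exfalso
      set k := (PySem.Chars.find (u ++ '님' :: t) ['님']).toNat
      rw [List.drop_append_of_le_length (Nat.le_of_lt h)] at hpre
      obtain ⟨rest, hrest⟩ := hpre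
      have hdrop : u.drop k = '님' :: (rest.take (u.length - k - 1) ) ∨ True := Or.inr trivial
      -- u.drop k starts with '님'
      have hne : u.drop k ≠ [] := by
        intro hnil; rw [List.drop_eq_nil_iff] at hnil; omega
      cases hud : u.drop k with
      | nil => exact hne hud
      | cons a as =>
        rw [hud] at hrest
        have : a = '님' := by
          have := congrArg (fun l => l.head?) hrest
          simpa using this.symm
        subst this
        exact hu (List.mem_of_mem_drop (hud ▸ List.mem_cons_self))
    · exact h
    · exact ((hmin u.length h)
        (by rw [List.drop_append_of_le_length (le_refl _)]; simp)).elim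
  omega

-- decoding A's sentence returns B's direct emission
theorem dec1_eq (d : PySem.Dict String String) (uid sfx : String)
    (h : '님' ∉ uid.toList) (hs : ∃ t, sfx.toList = '님' :: t) :
    dec1 d (uid ++ sfx) = (d.get? uid).getD "" ++ sfx := by
  obtain ⟨t, ht⟩ := hs
  have hlist : (uid ++ sfx).toList = uid.toList ++ '님' :: t := by
    simp [ht]
  have hfind : PySem.Str.find (uid ++ sfx) "님" = (uid.toList.length : Int) := by
    rw [PySem.Str.find_eq, hlist]
    exact find_marker _ _ h
  have hslice₁ : PySem.Str.slice (uid ++ sfx) none (some (uid.toList.length : Int)) = uid := by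
    apply String.toList_inj.mp
    rw [PySem.Str.toList_slice, PySem.Chars.slice_eq_listSlice, hlist,
      PySem.List.slice_to _ (by positivity)]
    simp
  have hslice₂ : PySem.Str.slice (uid ++ sfx) (some (uid.toList.length : Int)) none = sfx := by
    apply String.toList_inj.mp
    rw [PySem.Str.toList_slice, PySem.Chars.slice_eq_listSlice, hlist,
      PySem.List.slice_from _ (by positivity)]
    simp [ht]
  rw [dec1, hfind, hslice₁, hslice₂]

-- per record, mapping A's decoder over A's sentences gives B's emission
theorem per_record (d : PySem.Dict String String) (record : String)
    (hdom : pvDomStr record = true) :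
    (emitRawL record).map (dec1 d) = emitBL d record := by
  have hu := uid_no_marker record hdom 1
  have e1 : dec1 d ((pySplitSp record).getD 1 "" ++ "님이 들어왔습니다.")
      = (d.get? ((pySplitSp record).getD 1 "")).getD "" ++ "님이 들어왔습니다." :=
    dec1_eq d _ _ hu ⟨"이 들어왔습니다.".toList, rfl⟩
  have e2 : dec1 d ((pySplitSp record).getD 1 "" ++ "님이 나갔습니다.")
      = (d.get? ((pySplitSp record).getD 1 "")).getD "" ++ "님이 나갔습니다." :=
    dec1_eq d _ _ hu ⟨"이 나갔습니다.".toList, rfl⟩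
  simp only [emitRawL, emitBL]
  split_ifs with h1 h2 h3 <;> simp_all

-- ===== VERDICT (by name: the statement is the Claim_ definition above) =====
theorem solution_spec : Claim_equal_solution := by
  intro records hdom _
  unfold Spec_solution solution solution_alt
  rw [pass1_eq, decodeA_fold, emitB_fold]
  simp only [List.nil_append, List.map_flatMap]
  apply List.flatMap_congr
  intro r hr
  apply per_record
  simp only [Dom_solution, List.all_eq_true] at hdom
  exact hdom r hr
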